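-- pv_equiv track=rewrite | github.com/ahnji0520/assignment | get_index_terms.py | get_index_terms
-- ===== SOURCE A (Python) =====
-- def get_index_terms(mt_list):
--     """ 형태소 분석 결과(형태소-품사 쌍)로부터 색인어를 추출
--     색인어는 품사가 일반명사(NNG), 고유명사(NNP), 영어(SL), 숫자(SN), 한자(SH)이어야 함
--     동일 어절 내에서 인접하여 결합된 경우도 색인어로 추출해야 함 (복합어)
--
--     mt_list: a list of tuples (morpheme, tag)
--     return value: a list of string (색인어 리스트)
--     """
--     nouns = []
--     tmplist = []
--     wordclass = ['NNG', 'NNP', 'SL', 'SN', 'SH']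
--
--     cnt = 0
--     k = ''
--     for i in mt_list:
--         if i[1] in wordclass:
--             nouns.append(i[0])
--             cnt += 1
--             k += i[0]
--         elif i[1] not in wordclass:
--             if cnt > 1:
--                 tmplist.append(k)
--                 x = ''
--                 for i in tmplist:
--                     if len(i) > len(x):
--                         x = i
--
--                 if x != '':
--                     nouns.append(x)
--                     tmplist.remove(x)
--             cnt = 0
--             k = ''
--
--     if cnt > 1:
--         tmplist.append(k)
--         x = ''
--         for i in tmplist:
--             if len(i) > len(x):
--                 x = i
--
--         if x != '':
--             nouns.append(x)
--
--     return nouns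
-- ===== SOURCE B (Python) =====
-- def get_index_terms(mt_list):
--     """Run-segmentation rewrite: instead of an element-wise state machine with a
--     pending-compound list and longest-element scan, scan maximal runs of
--     index-term morphemes with an index jump, slice each run out wholesale, and
--     emit its morphemes followed by the run's concatenation (when the run has
--     >= 2 morphemes and the concatenation is nonempty)."""
--     WORDCLASS = frozenset(('NNG', 'NNP', 'SL', 'SN', 'SH'))
--     n = len(mt_list)
--     out = []
--     i = 0
--     while i < n:
--         if mt_list[i][1] not in WORDCLASS:
--             i += 1
--             continue
--         j = i
--         while j < n and mt_list[j][1] in WORDCLASS: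
--             j += 1
--         morphs = [item[0] for item in mt_list[i:j]]
--         out += morphs
--         if j - i > 1:
--             compound = ''.join(morphs)
--             if compound:
--                 out.append(compound)
--         i = j
--     return out
-- ===== Notes on version B (the rewrite author's own statement) =====
-- stated objective: alternative
-- what changed: Replaced A's element-wise state machine (counter, growing string, pending-compound list with a longest-element scan and remove()) by run segmentation: an index jump finds each maximal run of index-term tags, the run is sliced out wholesale and its morphemes plus (for runs of >= 2) their concatenation are emitted as one segment.
import Mathlib
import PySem

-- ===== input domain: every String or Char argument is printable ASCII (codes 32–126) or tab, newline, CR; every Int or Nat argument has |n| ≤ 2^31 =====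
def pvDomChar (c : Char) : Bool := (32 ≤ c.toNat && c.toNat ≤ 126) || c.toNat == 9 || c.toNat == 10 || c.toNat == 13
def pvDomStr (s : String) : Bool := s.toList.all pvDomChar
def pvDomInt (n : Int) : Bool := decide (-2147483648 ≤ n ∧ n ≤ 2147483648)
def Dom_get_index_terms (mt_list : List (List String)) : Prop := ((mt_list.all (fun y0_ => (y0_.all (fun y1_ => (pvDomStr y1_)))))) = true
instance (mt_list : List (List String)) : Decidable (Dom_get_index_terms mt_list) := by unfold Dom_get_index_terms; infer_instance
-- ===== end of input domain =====

-- B replaces A's element-wise state machine (counter, growing string, pending-compound list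
-- with longest scan and remove) by run segmentation over maximal index-term runs; objective: alternative.


-- ===== PORT A =====
-- A's growing string k is carried as List Char (Python str concatenation = list-of-chars
-- concatenation, exact); tmplist likewise holds List Char so len/remove are list operations.
-- A's loop state: (nouns, tmplist, cnt, k).
def aState : Type := List String × List (List Char) × Int × List Char

-- the inner 'for i in tmplist: if len(i) > len(x): x = i' scan (x starts as '')
def aLongest (tmplist : List (List Char)) : List Char :=
  tmplist.foldl (fun x i => if i.length > x.length then i else x) []

-- the flush block inside the loop: append k, pick longest, append & remove it if nonempty
-- (tmplist.remove(x) is exact via PySem.List.remove?: x ∈ tmplist whenever x ≠ '', so the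
-- getD fallback is never taken and Python's ValueError cannot occur here)
def aFlushMid (nouns : List String) (tmplist : List (List Char)) (k : List Char) :
    List String × List (List Char) :=
  let tmplist := tmplist ++ [k]
  let x := aLongest tmplist
  if x ≠ [] then (nouns ++ [String.ofList x], (PySem.List.remove? tmplist x).getD tmplist)
  else (nouns, tmplist)

def aWordclass : List String := ["NNG", "NNP", "SL", "SN", "SH"]

def aStep (s : aState) (i : List String) : aState :=
  let tag := (PySem.List.pyGet? i 1).getD ""   -- i[1]; none (IndexError) excluded by Pre_
  if tag ∈ aWordclass then
    let m := (PySem.List.pyGet? i 0).getD ""   -- i[0]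
    (s.1 ++ [m], s.2.1, s.2.2.1 + 1, s.2.2.2 ++ m.toList)
  else
    if s.2.2.1 > 1 then
      let r := aFlushMid s.1 s.2.1 s.2.2.2
      (r.1, r.2, 0, [])
    else (s.1, s.2.1, 0, [])

-- the trailing 'if cnt > 1: …' block (no remove here, matching A)
def aFinish (s : aState) : List String :=
  if s.2.2.1 > 1 then
    let x := aLongest (s.2.1 ++ [s.2.2.2])
    if x ≠ [] then s.1 ++ [String.ofList x] else s.1
  else s.1

def get_index_terms (mt_list : List (List String)) : List String :=
  aFinish (mt_list.foldl aStep ([], [], 0, []))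

-- ===== PORT B =====
-- B (Source B) walks the list by maximal runs: `mt_list[i][1] not in WORDCLASS` skips an item,
-- otherwise the inner `while j` scan delimits the run (= takeWhile/dropWhile on the suffix),
-- the slice mt_list[i:j] is mapped to its morphemes and the segment is emitted, then i = j.
def bIsWord (it : List String) : Bool :=
  decide (((PySem.List.pyGet? it 1).getD "") ∈ aWordclass)   -- mt_list[j][1] in WORDCLASS

def bMorph (it : List String) : String := (PySem.List.pyGet? it 0).getD ""   -- item[0]

def bGo : List (List String) → List String
  | [] => []
  | it :: rest =>
    if h : bIsWord it then
      let run := List.takeWhile bIsWord (it :: rest)     -- mt_list[i:j], the inner while-j scan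
      let rest' := List.dropWhile bIsWord (it :: rest)   -- continue at i = j
      let morphs := run.map bMorph                       -- [item[0] for item in mt_list[i:j]]
      let seg :=
        if run.length > 1 then
          let compound := PySem.Str.join "" morphs       -- ''.join(morphs)
          if compound ≠ "" then morphs ++ [compound] else morphs
        else morphs
      seg ++ bGo rest'
    else bGo rest                                        -- i += 1; continue
termination_by l => l.length
decreasing_by
  · have hd : List.dropWhile bIsWord (it :: rest) = List.dropWhile bIsWord rest := by
      simp [List.dropWhile, h]
    simp only [hd]
    exact Nat.lt_succ_of_le (List.length_dropWhile_le _ _)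
  · simp

def get_index_terms_alt (mt_list : List (List String)) : List String := bGo mt_list

-- ===== PRECONDITION & SPEC =====
-- Pre_ excludes exactly the inputs where Python A raises IndexError: a pair with fewer
-- than 2 components (i[1] is always read).
def Pre_get_index_terms (mt_list : List (List String)) : Prop :=
  ∀ i ∈ mt_list, 2 ≤ i.length
instance (mt_list : List (List String)) : Decidable (Pre_get_index_terms mt_list) := by
  unfold Pre_get_index_terms; infer_instance

def pvWitness_get_index_terms : List (List String) :=
  [["ab", "NNG"], ["cd", "NNP"], ["x", "VV"], ["e", "SL"]]

def Spec_get_index_terms (mt_list : List (List String)) (out : List String) : Prop := out = get_index_terms_alt mt_list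
instance (mt_list : List (List String)) (out : List String) : Decidable (Spec_get_index_terms mt_list out) := by unfold Spec_get_index_terms; infer_instance

-- ===== CLAIM (what is proved, stated in full; the proofs are below) =====
def Claim_equal_get_index_terms : Prop := ∀ (mt_list : List (List String)), Dom_get_index_terms mt_list → Pre_get_index_terms mt_list → Spec_get_index_terms mt_list (get_index_terms mt_list)

-- ===== LEMMAS AND PROOFS =====

-- Proof-only intermediate form: a single-pass accumulator (nouns, run) equivalent to both
-- A's state machine and B's run segmentation.
def bFlushSeg (run : List String) : List String :=
  if run.length > 1 then
    let compound := PySem.Str.join "" run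
    if compound ≠ "" then [compound] else []
  else []

def bFlush (nouns : List String) (run : List String) : List String :=
  if run.length > 1 then
    let compound := PySem.Str.join "" run
    if compound ≠ "" then nouns ++ [compound] else nouns
  else nouns

def bStep (s : List String × List String) (item : List String) :
    List String × List String :=
  let tag := (PySem.List.pyGet? item 1).getD ""
  if tag ∈ aWordclass then
    let m := (PySem.List.pyGet? item 0).getD ""
    (s.1 ++ [m], s.2 ++ [m])
  else (bFlush s.1 s.2, [])

-- pending-run form of B: continue scanning with `run` already emitted into nouns
def bPend : List String → List (List String) → List String
  | run, [] => bFlushSeg run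
  | run, it :: l =>
    if bIsWord it then bMorph it :: bPend (run ++ [bMorph it]) l
    else bFlushSeg run ++ bPend [] l

-- the inner scan over a list of empty strings followed by k yields k (or '' if k = '')
lemma aLongest_all_nil {tmpl : List (List Char)} (h : ∀ t ∈ tmpl, t = ([] : List Char))
    (k : List Char) : aLongest (tmpl ++ [k]) = if k = [] then [] else k := by
  have hbase : tmpl.foldl (fun x i => if i.length > x.length then i else x) [] = [] := by
    induction tmpl with
    | nil => rfl
    | cons a t ih =>
      have ha := h a (by simp)
      simp [List.foldl, ha]
      exact ih (fun t ht => h t (by simp [ht]))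
  unfold aLongest
  rw [List.foldl_append, hbase]
  cases k with
  | nil => simp
  | cons c cs => simp [List.foldl]

-- removing k (≠ '') from empties ++ [k] gives back the empties
lemma remove_all_nil {tmpl : List (List Char)} (h : ∀ t ∈ tmpl, t = ([] : List Char))
    {k : List Char} (hk : k ≠ []) :
    PySem.List.remove? (tmpl ++ [k]) k = some tmpl := by
  induction tmpl with
  | nil => simp
  | cons a t ih =>
    have ha := h a (by simp)
    subst ha
    rw [List.cons_append, PySem.List.remove?_cons_of_ne _ (Ne.symm hk),
      ih (fun t ht => h t (by simp [ht]))]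
    rfl

-- ''.join(run) is the concatenation of run's characters
lemma join_empty_sep (run : List String) :
    PySem.Str.join "" run = String.ofList (run.map String.toList).flatten := by
  show String.ofList (PySem.Chars.join "".toList (run.map String.toList)) = _
  congr 1
  show List.intercalate [] (run.map String.toList) = _
  unfold List.intercalate
  generalize run.map String.toList = l
  induction l with
  | nil => simp
  | cons a t ih => cases t <;> simp_all [List.intersperse]

-- main invariant: from related states, A's remaining loop + trailing flush equals the
-- accumulator form's remaining loop + final flush
lemma loop_rel (l : List (List String)) :
    ∀ (nouns : List String) (tmpl : List (List Char)) (run : List String),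
    (∀ t ∈ tmpl, t = ([] : List Char)) →
    aFinish (l.foldl aStep (nouns, tmpl, (run.length : Int), (run.map String.toList).flatten))
      = bFlush (l.foldl bStep (nouns, run)).1 (l.foldl bStep (nouns, run)).2 := by
  induction l with
  | nil =>
    intro nouns tmpl run htmpl
    simp only [List.foldl_nil, aFinish, bFlush]
    by_cases hr : run.length > 1
    · have : ((run.length : Int) > 1) := by exact_mod_cast hr
      rw [if_pos this, if_pos hr]
      rw [aLongest_all_nil htmpl]
      by_cases hk : (run.map String.toList).flatten = []
      · rw [if_pos hk]
        simp only [ne_eq, not_true_eq_false, if_false]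
        rw [join_empty_sep, hk]
        simp
      · rw [if_neg hk, if_pos hk, join_empty_sep]
        rw [if_pos (by simpa using hk)]
    · have : ¬((run.length : Int) > 1) := by exact_mod_cast hr
      rw [if_neg this, if_neg hr]
  | cons i l ih =>
    intro nouns tmpl run htmpl
    simp only [List.foldl_cons]
    by_cases htag : ((PySem.List.pyGet? i 1).getD "") ∈ aWordclass
    · -- index-term morpheme: both sides extend nouns and the run
      set m := (PySem.List.pyGet? i 0).getD "" with hm
      have ha : aStep (nouns, tmpl, (run.length : Int), (run.map String.toList).flatten) i
          = (nouns ++ [m], tmpl, ((run ++ [m]).length : Int),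
             ((run ++ [m]).map String.toList).flatten) := by
        simp only [aStep, htag, ← hm, if_true, List.length_append, List.map_append,
          List.flatten_append, List.map_cons, List.map_nil, List.flatten_cons,
          List.flatten_nil, List.append_nil, List.length_cons, List.length_nil]
        refine Prod.ext rfl (Prod.ext rfl (Prod.ext ?_ rfl))
        push_cast; ring
      have hb : bStep (nouns, run) i = (nouns ++ [m], run ++ [m]) := by
        simp [bStep, htag, hm]
      rw [ha, hb]
      exact ih (nouns ++ [m]) tmpl (run ++ [m]) htmpl
    · -- non-index tag: flush
      by_cases hr : run.length > 1
      · have hri : ((run.length : Int) > 1) := by exact_mod_cast hr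
        have hb : bStep (nouns, run) i = (bFlush nouns run, []) := by
          simp [bStep, htag]
        rw [hb]
        by_cases hk : (run.map String.toList).flatten = []
        · -- empty compound: A keeps it in tmplist, the accumulator form emits nothing
          have ha : aStep (nouns, tmpl, (run.length : Int), (run.map String.toList).flatten) i
              = (nouns, tmpl ++ [[]], 0, []) := by
            simp only [aStep, htag, if_pos hri, aFlushMid]
            rw [hk, aLongest_all_nil htmpl]
            simp
          rw [ha]
          have hbf : bFlush nouns run = nouns := by
            simp only [bFlush, if_pos hr, join_empty_sep, hk]
            simp
          rw [hbf]
          have := ih nouns (tmpl ++ [[]]) []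
            (by intro t ht; rcases List.mem_append.1 ht with h' | h'
                · exact htmpl t h'
                · simpa using h')
          simpa using this
        · -- nonempty compound: both emit it
          have ha : aStep (nouns, tmpl, (run.length : Int), (run.map String.toList).flatten) i
              = (nouns ++ [String.ofList (run.map String.toList).flatten], tmpl, 0, []) := by
            simp only [aStep, htag, if_pos hri, aFlushMid]
            rw [aLongest_all_nil htmpl, if_neg hk]
            rw [remove_all_nil htmpl hk]
            simp [hk]
          rw [ha]
          have hbf : bFlush nouns run
              = nouns ++ [String.ofList (run.map String.toList).flatten] := by
            simp only [bFlush, if_pos hr, join_empty_sep]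
            rw [if_pos (by simpa using hk)]
          rw [hbf]
          have := ih (nouns ++ [String.ofList (run.map String.toList).flatten]) tmpl [] htmpl
          simpa using this
      · -- short run: both just reset
        have hri : ¬((run.length : Int) > 1) := by exact_mod_cast hr
        have ha : aStep (nouns, tmpl, (run.length : Int), (run.map String.toList).flatten) i
            = (nouns, tmpl, 0, []) := by
          simp [aStep, htag, hri]
        have hb : bStep (nouns, run) i = (nouns, []) := by
          simp [bStep, htag, bFlush, hr]
        rw [ha, hb]
        have := ih nouns tmpl [] htmpl
        simpa using this

lemma bFlush_eq (nouns run : List String) : bFlush nouns run = nouns ++ bFlushSeg run := by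
  unfold bFlush bFlushSeg
  by_cases h1 : run.length > 1 <;> by_cases h2 : PySem.Str.join "" run = "" <;> simp [h1, h2]

-- the accumulator form equals the pending-run form
lemma fold_eq_pend (l : List (List String)) :
    ∀ (nouns run : List String),
    bFlush (l.foldl bStep (nouns, run)).1 (l.foldl bStep (nouns, run)).2
      = nouns ++ bPend run l := by
  induction l with
  | nil => intro nouns run; simpa using bFlush_eq nouns run
  | cons it l ih =>
    intro nouns run
    simp only [List.foldl_cons]
    by_cases htag : ((PySem.List.pyGet? it 1).getD "") ∈ aWordclass
    · have hb : bStep (nouns, run) it = (nouns ++ [bMorph it], run ++ [bMorph it]) := by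
        simp [bStep, htag, bMorph]
      have hw : bIsWord it = true := by simp [bIsWord, htag]
      rw [hb, ih, bPend, if_pos hw]
      simp
    · have hb : bStep (nouns, run) it = (bFlush nouns run, []) := by
        simp [bStep, htag]
      have hw : bIsWord it = false := by simp [bIsWord, htag]
      rw [hb, ih, bPend, if_neg (by simp [hw]), bFlush_eq]
      simp

-- pending-run form over an all-word prefix emits its morphemes one by one
lemma pend_word_prefix (w : List (List String)) (hw : ∀ x ∈ w, bIsWord x = true) :
    ∀ (run : List String) (rest : List (List String)),
    bPend run (w ++ rest) = w.map bMorph ++ bPend (run ++ w.map bMorph) rest := by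
  induction w with
  | nil => intro run rest; simp
  | cons a w ih =>
    intro run rest
    have ha := hw a (by simp)
    rw [List.cons_append, bPend, if_pos ha,
      ih (fun x hx => hw x (by simp [hx])) (run ++ [bMorph a]) rest]
    simp

lemma bFlushSeg_nil : bFlushSeg [] = [] := by simp [bFlushSeg]

-- pending flush against a suffix that starts with a non-word (or is empty)
lemma pend_flush_head (run : List String) (rest : List (List String))
    (h : rest = [] ∨ ∃ r tl, rest = r :: tl ∧ bIsWord r = false) :
    bPend run rest = bFlushSeg run ++ bPend [] rest := by
  rcases h with h | ⟨r, tl, h, hr⟩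
  · subst h; simp [bPend, bFlushSeg_nil]
  · subst h
    rw [bPend, if_neg (by simp [hr]), bPend, if_neg (by simp [hr]), bFlushSeg_nil]
    simp

-- the pending-run form (from the empty run) is B's run segmentation
lemma pend_eq_go_aux : ∀ (n : Nat) (l : List (List String)), l.length ≤ n → bPend [] l = bGo l := by
  intro n
  induction n with
  | zero =>
    intro l hl
    have : l = [] := List.length_eq_zero_iff.mp (Nat.le_zero.mp hl)
    subst this
    simp [bPend, bFlushSeg, bGo]
  | succ n ih =>
    intro l hl
    cases l with
    | nil => simp [bPend, bFlushSeg, bGo]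
    | cons it rest =>
      by_cases h : bIsWord it = true
      · have hdrop : List.dropWhile bIsWord (it :: rest) = List.dropWhile bIsWord rest := by
          simp [List.dropWhile, h]
        have hlen : (List.dropWhile bIsWord (it :: rest)).length ≤ n := by
          rw [hdrop]
          exact le_trans (List.length_dropWhile_le _ _) (by simpa using hl)
        have ihr : bPend [] (List.dropWhile bIsWord (it :: rest))
            = bGo (List.dropWhile bIsWord (it :: rest)) := ih _ hlen
        have hdec := List.takeWhile_append_dropWhile (p := bIsWord) (l := it :: rest)
        have hwords : ∀ x ∈ List.takeWhile bIsWord (it :: rest), bIsWord x = true :=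
          fun x hx => List.mem_takeWhile_imp hx
        have hhead : List.dropWhile bIsWord (it :: rest) = [] ∨
            ∃ r tl, List.dropWhile bIsWord (it :: rest) = r :: tl ∧ bIsWord r = false := by
          cases hrest : List.dropWhile bIsWord (it :: rest) with
          | nil => exact Or.inl rfl
          | cons r tl =>
            refine Or.inr ⟨r, tl, rfl, ?_⟩
            have hne : List.dropWhile bIsWord (it :: rest) ≠ [] := by simp [hrest]
            have := List.head_dropWhile_not bIsWord hne
            simp only [hrest, List.head_cons] at this
            exact this
        rw [bGo, dif_pos h]
        show bPend [] (it :: rest)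
          = (if (List.takeWhile bIsWord (it :: rest)).length > 1 then
               let compound := PySem.Str.join "" ((List.takeWhile bIsWord (it :: rest)).map bMorph)
               if compound ≠ "" then
                 (List.takeWhile bIsWord (it :: rest)).map bMorph ++ [compound]
               else (List.takeWhile bIsWord (it :: rest)).map bMorph
             else (List.takeWhile bIsWord (it :: rest)).map bMorph)
            ++ bGo (List.dropWhile bIsWord (it :: rest))
        calc bPend [] (it :: rest)
            = bPend [] (List.takeWhile bIsWord (it :: rest)
                ++ List.dropWhile bIsWord (it :: rest)) := by rw [hdec]
          _ = (List.takeWhile bIsWord (it :: rest)).map bMorph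
                ++ bPend ((List.takeWhile bIsWord (it :: rest)).map bMorph)
                   (List.dropWhile bIsWord (it :: rest)) := by
              rw [pend_word_prefix _ hwords [] _]; simp
          _ = (List.takeWhile bIsWord (it :: rest)).map bMorph
                ++ (bFlushSeg ((List.takeWhile bIsWord (it :: rest)).map bMorph)
                    ++ bPend [] (List.dropWhile bIsWord (it :: rest))) := by
              rw [pend_flush_head _ _ hhead]
          _ = _ := by
              rw [ihr]
              have hlen2 : ((List.takeWhile bIsWord (it :: rest)).map bMorph).length
                  = (List.takeWhile bIsWord (it :: rest)).length := by simp
              simp only [bFlushSeg, hlen2]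
              split_ifs <;> simp
      · have hw : bIsWord it = false := by simpa using h
        have ihr : bPend [] rest = bGo rest := ih rest (by simpa using hl)
        rw [bPend, if_neg (by simp [hw]), bFlushSeg_nil, List.nil_append, ihr,
          bGo, dif_neg (by simp [hw])]

lemma pend_eq_go (l : List (List String)) : bPend [] l = bGo l :=
  pend_eq_go_aux l.length l le_rfl

-- ===== VERDICT (by name: the statement is the Claim_ definition above) =====
theorem get_index_terms_spec : Claim_equal_get_index_terms := by
  intro mt_list _ _
  show get_index_terms mt_list = get_index_terms_alt mt_list
  have h1 := loop_rel mt_list [] [] [] (by intro t ht; simp at ht)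
  have h2 := fold_eq_pend mt_list [] []
  simp only [get_index_terms, get_index_terms_alt]
  rw [show (([], [], 0, []) : aState) = (([], [], ((([] : List String)).length : Int),
    ((([] : List String)).map String.toList).flatten)) by simp] at *
  rw [h1, h2, pend_eq_go]
  simp
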